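-- pv_equiv track=rewrite | github.com/Makaadam11/Python | zestaw 4.py | squarestr
-- ===== SOURCE A (Python) =====
-- def squarestr(length, width):
-- 	"""Returns string with square"""
-- 	start="+"
-- 	width1=width
--
-- 	while width1 != 0:
-- 		start+="---+"
-- 		width1-=1
-- 	square=start + "\n"
--
-- 	for n in range(length):
-- 		width2=width
-- 		line1="|"
-- 		line2="+"
-- 		while width2 != 0:
-- 			line1+="   |"
-- 			line2+="---+"
-- 			width2-=1
-- 		square+=line1 + "\n"
-- 		square+=line2 + "\n"
-- 	return square
-- ===== SOURCE B (Python) =====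
-- def squarestr(length, width):
--     """Returns string with square"""
--     def cell(r, c):
--         if c == 4 * width + 1:
--             return "\n"
--         if r % 2 == 0:
--             return "+" if c % 4 == 0 else "-"
--         return "|" if c % 4 == 0 else " "
--     even = "".join(cell(0, c) for c in range(4 * width + 2))
--     odd = "".join(cell(1, c) for c in range(4 * width + 2))
--     return "".join(even if r % 2 == 0 else odd for r in range(2 * max(length, 0) + 1))
-- ===== Notes on version B (the rewrite author's own statement) =====
-- stated objective: alternative
-- what changed: Replaces A's incremental string-building loops with a coordinate formula: the character at (row, col) is computed directly from row parity and col mod 4; the two distinct rows are evaluated once from that formula and rows are selected by parity, with no appending loops.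
import Mathlib
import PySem

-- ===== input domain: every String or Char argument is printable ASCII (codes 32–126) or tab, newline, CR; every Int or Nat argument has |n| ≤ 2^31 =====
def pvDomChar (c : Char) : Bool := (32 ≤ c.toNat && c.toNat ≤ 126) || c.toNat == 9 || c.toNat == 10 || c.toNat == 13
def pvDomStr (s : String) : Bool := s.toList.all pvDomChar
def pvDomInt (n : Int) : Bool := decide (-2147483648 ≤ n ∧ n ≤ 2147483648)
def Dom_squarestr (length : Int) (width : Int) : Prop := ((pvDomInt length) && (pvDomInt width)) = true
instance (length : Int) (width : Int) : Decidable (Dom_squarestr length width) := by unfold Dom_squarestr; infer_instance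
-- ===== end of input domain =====

-- B builds the grid from a coordinate formula (row parity, column mod 4) joined over all
-- (row, col) pairs, instead of A's incremental string-building loops (objective: alternative).

-- ===== PORT A =====
-- 'while width1 != 0: start += "---+"; width1 -= 1' terminates exactly for width ≥ 0
-- (Pre_ requires that); rendered as fuel-counted recursion on width.toNat.
def aTopLoop : Nat → String → String
  | 0, s => s
  | n + 1, s => aTopLoop n (s ++ "---+")

-- inner while building line1 and line2 together
def aRowLoop : Nat → String → String → String × String
  | 0, l1, l2 => (l1, l2)
  | n + 1, l1, l2 => aRowLoop n (l1 ++ "   |") (l2 ++ "---+")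

def squarestr (length : Int) (width : Int) : String :=
  let start := aTopLoop width.toNat "+"
  let square := start ++ "\n"
  (PySem.List.pyRange 0 length 1).foldl
    (fun sq _ =>
      let p := aRowLoop width.toNat "|" "+"
      (sq ++ (p.1 ++ "\n")) ++ (p.2 ++ "\n"))
    square

-- ===== PORT B =====
-- Source B's cell(r, c): the character of the grid at row r, column c
def bCell (width : Int) (r c : Nat) : Char :=
  if (c : Int) = 4 * width + 1 then '\n'
  else if r % 2 = 0 then (if c % 4 = 0 then '+' else '-')
  else (if c % 4 = 0 then '|' else ' ')

-- one generated row: c ranges over range(4*width+2)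
def bRow (width : Int) (r : Nat) : List Char :=
  (List.range (4 * width + 2).toNat).map (bCell width r)

-- even/odd: the two rows evaluated from the cell formula; then
-- ''.join(even if r % 2 == 0 else odd for r in range(2*max(length,0)+1))
def squarestr_alt (length : Int) (width : Int) : String :=
  let even := bRow width 0
  let odd := bRow width 1
  String.ofList ((List.range (2 * max length 0 + 1).toNat).flatMap
    (fun r => if r % 2 = 0 then even else odd))

-- ===== PRECONDITION & SPEC =====
-- Pre_ excludes width < 0, on which Python A loops forever (no return), so nothing is claimed there.
def Pre_squarestr (length : Int) (width : Int) : Prop := 0 ≤ width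
instance (length : Int) (width : Int) : Decidable (Pre_squarestr length width) := by unfold Pre_squarestr; infer_instance
def pvWitness_squarestr : Int × Int := (3, 2)

def Spec_squarestr (length : Int) (width : Int) (out : String) : Prop := out = squarestr_alt length width
instance (length : Int) (width : Int) (out : String) : Decidable (Spec_squarestr length width out) := by unfold Spec_squarestr; infer_instance

-- ===== CLAIM (what is proved, stated in full; the proofs are below) =====
def Claim_equal_squarestr : Prop := ∀ (length : Int) (width : Int), Dom_squarestr length width → Pre_squarestr length width → Spec_squarestr length width (squarestr length width)

-- ===== LEMMAS AND PROOFS =====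

-- Python's  s * n  for n ≥ 0, used only to characterise A's loops
def strRep (s : String) : Nat → String
  | 0 => ""
  | n + 1 => s ++ strRep s n

theorem aTopLoop_eq (n : Nat) (s : String) : aTopLoop n s = s ++ strRep "---+" n := by
  induction n generalizing s with
  | zero => simp [aTopLoop, strRep]
  | succ k ih => simp [aTopLoop, strRep, ih, String.append_assoc]

theorem aRowLoop_eq (n : Nat) (a b : String) :
    aRowLoop n a b = (a ++ strRep "   |" n, b ++ strRep "---+" n) := by
  induction n generalizing a b with
  | zero => simp [aRowLoop, strRep]
  | succ k ih => simp [aRowLoop, strRep, ih, String.append_assoc]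

theorem foldl_const_append {α : Type} (l : List α) (c s : String) :
    l.foldl (fun sq _ => sq ++ c) s = s ++ strRep c l.length := by
  induction l generalizing s with
  | nil => simp [strRep]
  | cons x xs ih => simp [List.foldl, strRep, ih, String.append_assoc]

theorem length_pyRange_one (a : Int) : (PySem.List.pyRange 0 a 1).length = a.toNat := by
  rcases Int.le_total a 0 with h | h
  · rw [Int.toNat_of_nonpos h]
    have : PySem.List.pyRange 0 a 1 = [] := by
      simp [PySem.List.pyRange]; omega
    simp [this]
  · rw [show a = ((a.toNat : Nat) : Int) from (Int.toNat_of_nonneg h).symm,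
        PySem.List.pyRange_zero_natCast]
    simp; omega

theorem strRep_data (s : String) (n : Nat) :
    (strRep s n).toList = (List.replicate n s.toList).flatten := by
  induction n with
  | zero => rfl
  | succ k ih => simp [strRep, ih, List.replicate_succ]

-- the mod-4 map over range(4*w+1) is a :: w copies of [b,b,b,a]
theorem mod4_map (a b : Char) (w : Nat) :
    (List.range (4 * w + 1)).map (fun c => if c % 4 = 0 then a else b)
      = a :: (List.replicate w [b, b, b, a]).flatten := by
  induction w with
  | zero => simp
  | succ k ih =>
    have h : 4 * (k + 1) + 1 = (4 * k + 1) + 1 + 1 + 1 + 1 := by omega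
    rw [h, List.range_succ, List.range_succ, List.range_succ, List.range_succ]
    simp only [List.map_append, ih, List.map_cons, List.map_nil]
    have h1 : (4 * k + 1) % 4 = 1 := by omega
    have h2 : (4 * k + 1 + 1) % 4 = 2 := by omega
    have h3 : (4 * k + 1 + 1 + 1) % 4 = 3 := by omega
    have h4 : (4 * k + 1 + 1 + 1 + 1) % 4 = 0 := by omega
    rw [List.replicate_succ']
    simp [h1, h2, h3, h4]

theorem bRow_even (w : Nat) (r : Nat) (hr : r % 2 = 0) :
    bRow (w : Int) r = ('+' :: (List.replicate w ['-', '-', '-', '+']).flatten) ++ ['\n'] := by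
  unfold bRow
  have hn : ((4 * (w : Int) + 2)).toNat = (4 * w + 1) + 1 := by omega
  rw [hn, List.range_succ, List.map_append]
  have hmap : (List.range (4 * w + 1)).map (bCell (w : Int) r) =
      (List.range (4 * w + 1)).map (fun c => if c % 4 = 0 then '+' else '-') := by
    apply List.map_congr_left
    intro c hc
    rw [List.mem_range] at hc
    unfold bCell
    have hne : ¬ ((c : Int) = 4 * (w : Int) + 1) := by omega
    simp [hne, hr]
  rw [hmap, mod4_map]
  have hb : bCell (w : Int) r (4 * w + 1) = '\n' := by
    unfold bCell
    have : ((4 * w + 1 : Nat) : Int) = 4 * (w : Int) + 1 := by push_cast; ring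
    simp [this]
  simp [hb]

theorem bRow_odd (w : Nat) (r : Nat) (hr : r % 2 = 1) :
    bRow (w : Int) r = ('|' :: (List.replicate w [' ', ' ', ' ', '|']).flatten) ++ ['\n'] := by
  unfold bRow
  have hn : ((4 * (w : Int) + 2)).toNat = (4 * w + 1) + 1 := by omega
  rw [hn, List.range_succ, List.map_append]
  have hmap : (List.range (4 * w + 1)).map (bCell (w : Int) r) =
      (List.range (4 * w + 1)).map (fun c => if c % 4 = 0 then '|' else ' ') := by
    apply List.map_congr_left
    intro c hc
    rw [List.mem_range] at hc
    unfold bCell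
    have hne : ¬ ((c : Int) = 4 * (w : Int) + 1) := by omega
    have hr' : ¬ (r % 2 = 0) := by omega
    simp [hne, hr']
  rw [hmap, mod4_map]
  have hb : bCell (w : Int) r (4 * w + 1) = '\n' := by
    unfold bCell
    have : ((4 * w + 1 : Nat) : Int) = 4 * (w : Int) + 1 := by push_cast; ring
    simp [this]
  simp [hb]

-- the flatMap over 2n+1 alternating rows, as a list of chars
theorem grid_flatMap (w : Int) (n : Nat) :
    (List.range (2 * n + 1)).flatMap (fun r => if r % 2 = 0 then bRow w 0 else bRow w 1)
      = bRow w 0 ++ (List.replicate n (bRow w 1 ++ bRow w 0)).flatten := by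
  induction n with
  | zero => simp
  | succ k ih =>
    have h : 2 * (k + 1) + 1 = (2 * k + 1) + 1 + 1 := by omega
    rw [h, List.range_succ, List.range_succ]
    simp only [List.flatMap_append, ih, List.flatMap_cons, List.flatMap_nil]
    have e2 : (2 * k + 1 + 1) % 2 = 0 := by omega
    rw [List.replicate_succ']
    simp [e2]

-- the full char-list identity between A's repeated strings and B's row lists
theorem main_lists (w n : Nat) :
    "+".toList ++ (strRep "---+" w).toList ++ "\n".toList ++
      (strRep ("|" ++ strRep "   |" w ++ "\n" ++ ("+" ++ strRep "---+" w ++ "\n")) n).toList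
    = ('+' :: (List.replicate w ['-', '-', '-', '+']).flatten ++ ['\n']) ++
      (List.replicate n (('|' :: (List.replicate w [' ', ' ', ' ', '|']).flatten ++ ['\n']) ++
        ('+' :: (List.replicate w ['-', '-', '-', '+']).flatten ++ ['\n']))).flatten := by
  have hsep : "+".toList ++ (strRep "---+" w).toList ++ "\n".toList
      = '+' :: (List.replicate w ['-', '-', '-', '+']).flatten ++ ['\n'] := by
    rw [strRep_data]
    have h1 : "---+".toList = ['-', '-', '-', '+'] := rfl
    have h2 : "+".toList = ['+'] := rfl
    have h3 : "\n".toList = ['\n'] := rfl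
    rw [h1, h2, h3]; simp
  have hcont : "|".toList ++ (strRep "   |" w).toList ++ "\n".toList
      = '|' :: (List.replicate w [' ', ' ', ' ', '|']).flatten ++ ['\n'] := by
    rw [strRep_data]
    have h1 : "   |".toList = [' ', ' ', ' ', '|'] := rfl
    have h2 : "|".toList = ['|'] := rfl
    have h3 : "\n".toList = ['\n'] := rfl
    rw [h1, h2, h3]; simp
  have hblock : ("|" ++ strRep "   |" w ++ "\n" ++ ("+" ++ strRep "---+" w ++ "\n")).toList
      = ('|' :: (List.replicate w [' ', ' ', ' ', '|']).flatten ++ ['\n']) ++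
        ('+' :: (List.replicate w ['-', '-', '-', '+']).flatten ++ ['\n']) := by
    simp only [String.toList_append]
    rw [← hcont, ← hsep]
    try simp [List.append_assoc]
  rw [strRep_data ("|" ++ strRep "   |" w ++ "\n" ++ ("+" ++ strRep "---+" w ++ "\n")) n, hblock, hsep]

-- ===== VERDICT (by name: the statement is the Claim_ definition above) =====
theorem squarestr_spec : Claim_equal_squarestr := by
  unfold Claim_equal_squarestr
  intro length width _dom hpre
  unfold Pre_squarestr at hpre
  unfold Spec_squarestr squarestr squarestr_alt
  obtain ⟨w, rfl⟩ : ∃ w : Nat, width = (w : Int) := ⟨width.toNat, (Int.toNat_of_nonneg hpre).symm⟩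
  -- A-side: collapse the loops to repeated strings
  simp only [aTopLoop_eq, aRowLoop_eq]
  have hfn : (fun (sq : String) (_ : Int) =>
        sq ++ ("|" ++ strRep "   |" ((w : Int)).toNat ++ "\n") ++ ("+" ++ strRep "---+" ((w : Int)).toNat ++ "\n"))
      = (fun (sq : String) (_ : Int) =>
        sq ++ (("|" ++ strRep "   |" ((w : Int)).toNat ++ "\n") ++ ("+" ++ strRep "---+" ((w : Int)).toNat ++ "\n"))) := by
    funext sq z; rw [String.append_assoc]
  rw [hfn, foldl_const_append, length_pyRange_one]
  -- B-side: row counts and row contents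
  have hrows : (2 * max length 0 + 1).toNat = 2 * length.toNat + 1 := by omega
  have hw : ((w : Int)).toNat = w := by simp
  rw [hrows, hw, grid_flatMap, bRow_even w 0 (by omega), bRow_odd w 1 (by omega)]
  -- both sides as char lists
  have h := main_lists w length.toNat
  simp only [] at h
  conv_lhs => rw [← String.ofList_toList (s := "+" ++ strRep "---+" w ++ "\n" ++
    strRep ("|" ++ strRep "   |" w ++ "\n" ++ ("+" ++ strRep "---+" w ++ "\n")) length.toNat)]
  simp only [String.toList_append, h]
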